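-- pv_equiv track=rewrite | github.com/cmejo/AI_Scholar | scripts/backend-quality-metrics.py | _find_common_blocks
-- ===== SOURCE A (Python) =====
-- from typing import Dict, List, Any, Optional
--
-- def _find_common_blocks(lines1: List[str], lines2: List[str], min_length: int = 5) -> List[List[str]]:
--     """Find common blocks of lines between two files"""
--     common_blocks = []
--
--     for i in range(len(lines1) - min_length + 1):
--         for j in range(len(lines2) - min_length + 1):
--             block_length = 0
--
--             while (i + block_length < len(lines1) and
--                    j + block_length < len(lines2) and
--                    lines1[i + block_length] == lines2[j + block_length]):
--                 block_length += 1
--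
--             if block_length >= min_length:
--                 common_blocks.append(lines1[i:i + block_length])
--
--     return common_blocks
-- ===== SOURCE B (Python) =====
-- def _find_common_blocks(lines1, lines2, min_length=5):
--     """Find common blocks of lines between two files.
--
--     dp[i][j] is the length of the longest common prefix of lines1[i:] and
--     lines2[j:]; every dp cell with dp[i][j] >= min_length yields a block.
--     """
--     m = len(lines2)
--     dp = [[0] * (m + 1)]
--     for line in reversed(lines1):
--         nxt = dp[0]
--         row = [nxt[j + 1] + 1 if line == lines2[j] else 0 for j in range(m)] + [0]
--         dp.insert(0, row)
--     return [lines1[i:i + dp[i][j]]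
--             for i in range(len(lines1) - min_length + 1)
--             for j in range(m - min_length + 1)
--             if dp[i][j] >= min_length]
-- ===== Notes on version B (the rewrite author's own statement) =====
-- stated objective: alternative
-- what changed: Replaces the per-pair while-loop re-extension with a suffix-match DP table (dp[i][j] = dp[i+1][j+1] + 1 on equal lines) built in one bottom-up pass and then read off; Pre_ excludes negative min_length, outside the natural domain, where A degenerately emits empty blocks for out-of-range start pairs while B's table indexing raises IndexError.
-- outside the precondition, e.g. on _find_common_blocks(['a'], ['b'], -1): A returns [[], [], [], [], [], [], [], [], []], B raises IndexError
import Mathlib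
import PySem

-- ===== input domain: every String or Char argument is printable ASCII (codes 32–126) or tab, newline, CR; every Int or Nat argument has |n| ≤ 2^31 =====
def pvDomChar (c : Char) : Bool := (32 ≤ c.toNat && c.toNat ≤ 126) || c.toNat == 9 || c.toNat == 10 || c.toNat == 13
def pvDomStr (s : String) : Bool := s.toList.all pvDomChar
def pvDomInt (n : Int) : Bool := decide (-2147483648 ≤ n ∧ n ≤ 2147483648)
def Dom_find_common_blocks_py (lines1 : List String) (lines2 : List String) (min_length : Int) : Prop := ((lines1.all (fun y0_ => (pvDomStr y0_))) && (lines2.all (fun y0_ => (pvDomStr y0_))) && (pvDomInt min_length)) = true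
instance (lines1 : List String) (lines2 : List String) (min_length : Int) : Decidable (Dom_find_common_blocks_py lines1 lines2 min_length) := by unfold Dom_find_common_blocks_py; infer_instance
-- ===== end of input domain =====

-- B replaces A's per-pair while-loop re-extension by a suffix-match DP table
-- (dp[i][j] = dp[i+1][j+1] + 1 on equal lines) built in one bottom-up pass: a
-- structurally different algorithm of the same overall cost.

-- ===== PORT A =====
-- A's while loop: extends block_length while lines1[i+bl] == lines2[j+bl]; the Nat argument is
-- fuel making the same computation total (block_length never exceeds lines1.length, so
-- fuel = lines1.length + 1 always suffices; the caller passes exactly that).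
def pvAWhile (lines1 lines2 : List String) (i j : Int) : Int → Nat → Int
  | bl, 0 => bl
  | bl, fuel + 1 =>
    if (i + bl < (lines1.length : Int) ∧ j + bl < (lines2.length : Int)) ∧
        PySem.List.pyGet? lines1 (i + bl) = PySem.List.pyGet? lines2 (j + bl) then
      pvAWhile lines1 lines2 i j (bl + 1) fuel
    else bl

def find_common_blocks_py (lines1 : List String) (lines2 : List String) (min_length : Int) : List (List String) :=
  (PySem.List.pyRange 0 ((lines1.length : Int) - min_length + 1) 1).foldl (fun acc i =>
    (PySem.List.pyRange 0 ((lines2.length : Int) - min_length + 1) 1).foldl (fun acc j =>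
      let bl := pvAWhile lines1 lines2 i j 0 (lines1.length + 1)
      if min_length ≤ bl then acc ++ [PySem.List.slice lines1 (some i) (some (i + bl))] else acc) acc) []

-- ===== PORT B =====
-- the row comprehension: [nxt[j + 1] + 1 if line == lines2[j] else 0 for j in range(m)] + [0]
def pvDpRowB (line : String) (lines2 : List String) (nxt : List Int) : List Int :=
  ((PySem.List.pyRange 0 (lines2.length : Int) 1).map
      (fun j => if line = PySem.List.pyGetD lines2 j "" then PySem.List.pyGetD nxt (j + 1) 0 + 1 else 0))
    ++ [0]

-- B's loop 'for line in reversed(lines1): dp.insert(0, row)' builds the table front-to-back;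
-- expressed as the structural recursion over lines1 that produces the same list of rows.
def pvDpB (lines2 : List String) : List String → List (List Int)
  | [] => [List.replicate (lines2.length + 1) 0]
  | a :: rest => pvDpRowB a lines2 ((pvDpB lines2 rest).headD []) :: pvDpB lines2 rest

def find_common_blocks_py_alt (lines1 : List String) (lines2 : List String) (min_length : Int) : List (List String) :=
  let dp := pvDpB lines2 lines1
  (PySem.List.pyRange 0 ((lines1.length : Int) - min_length + 1) 1).flatMap (fun i =>
    ((PySem.List.pyRange 0 ((lines2.length : Int) - min_length + 1) 1).filter
        (fun j => decide (min_length ≤ PySem.List.pyGetD (PySem.List.pyGetD dp i []) j 0))).map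
      (fun j => PySem.List.slice lines1 (some i)
        (some (i + PySem.List.pyGetD (PySem.List.pyGetD dp i []) j 0))))

-- ===== PRECONDITION & SPEC =====
-- Pre_ excludes negative min_length (outside the task's natural domain): there A degenerately
-- emits empty blocks for out-of-range start pairs, while B's DP-table indexing raises IndexError.
def Pre_find_common_blocks_py (lines1 : List String) (lines2 : List String) (min_length : Int) : Prop :=
  0 ≤ min_length
instance (lines1 : List String) (lines2 : List String) (min_length : Int) : Decidable (Pre_find_common_blocks_py lines1 lines2 min_length) := by unfold Pre_find_common_blocks_py; infer_instance

def pvWitness_find_common_blocks_py : List String × List String × Int := (["a", "b", "a"], ["b", "a"], 1)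

def Spec_find_common_blocks_py (lines1 : List String) (lines2 : List String) (min_length : Int) (out : List (List String)) : Prop := out = find_common_blocks_py_alt lines1 lines2 min_length
instance (lines1 : List String) (lines2 : List String) (min_length : Int) (out : List (List String)) : Decidable (Spec_find_common_blocks_py lines1 lines2 min_length out) := by unfold Spec_find_common_blocks_py; infer_instance

-- ===== CLAIM (what is proved, stated in full; the proofs are below) =====
def Claim_equal_find_common_blocks_py : Prop := ∀ (lines1 : List String) (lines2 : List String) (min_length : Int), Dom_find_common_blocks_py lines1 lines2 min_length → Pre_find_common_blocks_py lines1 lines2 min_length → Spec_find_common_blocks_py lines1 lines2 min_length (find_common_blocks_py lines1 lines2 min_length)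

-- ===== LEMMAS AND PROOFS =====

-- length of the longest common prefix of two suffixes: the value both programs compute
def pvExt : List String → List String → Int
  | a :: xs, b :: ys => if a = b then pvExt xs ys + 1 else 0
  | _, _ => 0

lemma pvExt_nil_right (xs : List String) : pvExt xs [] = 0 := by
  cases xs <;> rfl

lemma pvExt_nil_left (ys : List String) : pvExt [] ys = 0 := by
  cases ys <;> rfl

lemma pvGetSome (l : List String) (k : Int) (h0 : 0 ≤ k) (h : k.toNat < l.length) :
    PySem.List.pyGet? l k = some l[k.toNat] := by
  obtain ⟨n, rfl⟩ : ∃ n : Nat, k = (n : Int) := ⟨k.toNat, by omega⟩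
  rw [PySem.List.pyGet?_natCast]
  simp only [Int.toNat_natCast] at h ⊢
  exact List.getElem?_eq_getElem h

lemma pvAWhile_ext : ∀ (fuel : Nat) (l1 l2 : List String) (i j bl : Int),
    0 ≤ i → 0 ≤ j → 0 ≤ bl → (l1.length : Int) < fuel + i + bl →
    pvAWhile l1 l2 i j bl fuel = bl + pvExt (l1.drop (i + bl).toNat) (l2.drop (j + bl).toNat) := by
  intro fuel
  induction fuel with
  | zero =>
    intro l1 l2 i j bl hi hj hbl hf
    have : l1.drop (i + bl).toNat = [] := List.drop_eq_nil_of_le (by omega)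
    simp [pvAWhile, this, pvExt]
  | succ fuel ih =>
    intro l1 l2 i j bl hi hj hbl hf
    rw [pvAWhile]
    split
    · rename_i hc
      obtain ⟨⟨h1, h2⟩, heq⟩ := hc
      have hk1 : (i + bl).toNat < l1.length := by omega
      have hk2 : (j + bl).toNat < l2.length := by omega
      have e1 := pvGetSome l1 (i + bl) (by omega) hk1
      have e2 := pvGetSome l2 (j + bl) (by omega) hk2
      have hab : l1[(i + bl).toNat] = l2[(j + bl).toNat] := by
        rw [e1, e2] at heq; exact Option.some_injective _ heq
      rw [ih l1 l2 i j (bl + 1) hi hj (by omega) (by omega)]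
      have d1 : l1.drop (i + bl).toNat = l1[(i + bl).toNat] :: l1.drop ((i + bl).toNat + 1) :=
        (List.getElem_cons_drop hk1).symm
      have d2 : l2.drop (j + bl).toNat = l2[(j + bl).toNat] :: l2.drop ((j + bl).toNat + 1) :=
        (List.getElem_cons_drop hk2).symm
      have t1 : (i + (bl + 1)).toNat = (i + bl).toNat + 1 := by omega
      have t2 : (j + (bl + 1)).toNat = (j + bl).toNat + 1 := by omega
      rw [t1, t2] at *
      rw [d1, d2]
      simp only [pvExt, if_pos hab]
      ring
    · rename_i hc
      by_cases h1 : i + bl < (l1.length : Int)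
      · by_cases h2 : j + bl < (l2.length : Int)
        · have hk1 : (i + bl).toNat < l1.length := by omega
          have hk2 : (j + bl).toNat < l2.length := by omega
          have e1 := pvGetSome l1 (i + bl) (by omega) hk1
          have e2 := pvGetSome l2 (j + bl) (by omega) hk2
          have hne : l1[(i + bl).toNat] ≠ l2[(j + bl).toNat] := by
            intro h; exact hc ⟨⟨h1, h2⟩, by rw [e1, e2, h]⟩
          have d1 : l1.drop (i + bl).toNat = l1[(i + bl).toNat] :: l1.drop ((i + bl).toNat + 1) :=
            (List.getElem_cons_drop hk1).symm
          have d2 : l2.drop (j + bl).toNat = l2[(j + bl).toNat] :: l2.drop ((j + bl).toNat + 1) :=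
            (List.getElem_cons_drop hk2).symm
          rw [d1, d2]
          simp [pvExt, hne]
        · have : l2.drop (j + bl).toNat = [] := List.drop_eq_nil_of_le (by omega)
          simp [this, pvExt_nil_right]
      · have : l1.drop (i + bl).toNat = [] := List.drop_eq_nil_of_le (by omega)
        simp [this, pvExt]

-- ---- DP-table characterisation ----

-- the DP row for the suffix s of lines1, as pvDpB produces it
def pvSufB (l2 : List String) : List String → List Int
  | [] => List.replicate (l2.length + 1) 0
  | a :: rest => pvDpRowB a l2 (pvSufB l2 rest)

lemma pvDpB_headD (l2 : List String) : ∀ s : List String, (pvDpB l2 s).headD [] = pvSufB l2 s := by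
  intro s
  cases s with
  | nil => rfl
  | cons a rest =>
    simp only [pvDpB, List.headD_cons, pvSufB]
    congr 1
    induction rest with
    | nil => rfl
    | cons b r ih => simp only [pvDpB, List.headD_cons, pvSufB]; congr 1

lemma pvDpB_getD (l2 : List String) : ∀ (s : List String) (k : Nat), k ≤ s.length →
    (pvDpB l2 s).getD k [] = pvSufB l2 (s.drop k) := by
  intro s
  induction s with
  | nil =>
    intro k hk
    simp only [List.length_nil, Nat.le_zero] at hk
    subst hk
    rfl
  | cons a rest ih =>
    intro k hk
    cases k with
    | zero =>
      simp only [pvDpB, List.getD_cons_zero, List.drop_zero, pvSufB]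
      congr 1
      exact pvDpB_headD l2 rest
    | succ k =>
      simp only [pvDpB, List.getD_cons_succ, List.drop_succ_cons]
      exact ih k (by simpa using hk)

lemma pvSufB_getD (l2 : List String) : ∀ (s : List String) (j : Nat),
    (pvSufB l2 s).getD j 0 = pvExt s (l2.drop j) := by
  intro s
  induction s with
  | nil =>
    intro j
    simp only [pvSufB]
    by_cases hj : j < l2.length + 1
    · rw [List.getD_eq_getElem _ _ (by simpa using hj), List.getElem_replicate, pvExt_nil_left]
    · rw [List.getD_eq_default _ _ (by simpa using hj), pvExt_nil_left]
  | cons a rest ih =>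
    intro j
    simp only [pvSufB, pvDpRowB]
    by_cases h : j < l2.length
    · have hj : j < ((PySem.List.pyRange 0 (l2.length : Int) 1).map
          (fun j => if a = PySem.List.pyGetD l2 j "" then PySem.List.pyGetD (pvSufB l2 rest) (j + 1) 0 + 1 else 0)).length := by
        simp [PySem.List.length_pyRange_one]; omega
      rw [List.getD_eq_getElem _ _ (by
        simp only [List.length_append, List.length_map, PySem.List.length_pyRange_one,
          List.length_cons, List.length_nil]
        omega)]
      rw [List.getElem_append_left hj]
      simp only [List.getElem_map, PySem.List.getElem_pyRange_one]
      have hg2 : PySem.List.pyGetD l2 ((0 : Int) + (j : Int)) "" = l2[j] := by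
        rw [zero_add, PySem.List.pyGetD_natCast]
        exact List.getD_eq_getElem _ _ h
      have hgn : PySem.List.pyGetD (pvSufB l2 rest) ((0 : Int) + (j : Int) + 1) 0
          = (pvSufB l2 rest).getD (j + 1) 0 := by
        rw [zero_add, show ((j : Int) + 1) = ((j + 1 : Nat) : Int) from by push_cast; ring,
          PySem.List.pyGetD_natCast]
      rw [hg2, hgn, ih (j + 1)]
      have hdrop : l2[j] :: l2.drop (j + 1) = l2.drop j := List.getElem_cons_drop h
      rw [← hdrop]
      simp only [pvExt]
    · have hnil : l2.drop j = [] := List.drop_eq_nil_of_le (by omega)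
      rw [hnil, pvExt_nil_right]
      by_cases hm : j = l2.length
      · subst hm
        rw [List.getD_eq_getElem _ _ (by
          simp only [List.length_append, List.length_map, PySem.List.length_pyRange_one,
            List.length_cons, List.length_nil]
          omega)]
        rw [List.getElem_append_right (by simp [PySem.List.length_pyRange_one])]
        simp [PySem.List.length_pyRange_one]
      · rw [List.getD_eq_default]
        simp only [List.length_append, List.length_map, PySem.List.length_pyRange_one,
          List.length_cons, List.length_nil]
        omega

-- B's table lookup equals the common-prefix length, for in-range i and range j
lemma pvLookup (l1 l2 : List String) (i j : Int) (hi0 : 0 ≤ i) (hi : i.toNat ≤ l1.length)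
    (hj : 0 ≤ j) :
    PySem.List.pyGetD (PySem.List.pyGetD (pvDpB l2 l1) i []) j 0
      = pvExt (l1.drop i.toNat) (l2.drop j.toNat) := by
  rw [PySem.List.pyGetD_of_nonneg _ _ hi0, PySem.List.pyGetD_of_nonneg _ _ hj]
  rw [pvDpB_getD l2 l1 i.toNat hi, pvSufB_getD]

-- the output group of block starts at i, the shared shape of both programs' inner loops
def pvGroup (l1 l2 : List String) (ml : Int) (i : Int) : List (List String) :=
  ((PySem.List.pyRange 0 ((l2.length : Int) - ml + 1) 1).filter
      (fun j => decide (ml ≤ pvExt (l1.drop i.toNat) (l2.drop j.toNat)))).map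
    (fun j => PySem.List.slice l1 (some i) (some (i + pvExt (l1.drop i.toNat) (l2.drop j.toNat))))

lemma pvInner (l1 l2 : List String) (ml i : Int) (hi : 0 ≤ i) (acc : List (List String)) :
    (PySem.List.pyRange 0 ((l2.length : Int) - ml + 1) 1).foldl
      (fun acc j =>
        let bl := pvAWhile l1 l2 i j 0 (l1.length + 1)
        if ml ≤ bl then acc ++ [PySem.List.slice l1 (some i) (some (i + bl))] else acc) acc
    = acc ++ pvGroup l1 l2 ml i := by
  rw [pvGroup, ← PySem.List.foldl_append_if (fun j => decide (ml ≤ pvExt (l1.drop i.toNat) (l2.drop j.toNat)))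
    (fun j => PySem.List.slice l1 (some i) (some (i + pvExt (l1.drop i.toNat) (l2.drop j.toNat))))
    (PySem.List.pyRange 0 ((l2.length : Int) - ml + 1) 1) acc]
  apply PySem.List.foldl_congr_mem
  intro g j hj
  have hj0 : 0 ≤ j := (PySem.List.mem_pyRange_one.mp hj).1
  have hw := pvAWhile_ext (l1.length + 1) l1 l2 i j 0 hi hj0 le_rfl (by push_cast; omega)
  simp only [add_zero, zero_add] at hw
  simp only [hw, decide_eq_true_eq]

lemma A_eq (l1 l2 : List String) (ml : Int) :
    find_common_blocks_py l1 l2 ml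
      = (PySem.List.pyRange 0 ((l1.length : Int) - ml + 1) 1).flatMap (pvGroup l1 l2 ml) := by
  unfold find_common_blocks_py
  refine Eq.trans (PySem.List.foldl_congr_mem _ _ (fun acc i => acc ++ pvGroup l1 l2 ml i) _ ?_) ?_
  · intro acc i hi
    exact pvInner l1 l2 ml i (PySem.List.mem_pyRange_one.mp hi).1 acc
  · rw [PySem.List.foldl_append_eq_flatMap]
    simp

lemma B_eq (l1 l2 : List String) (ml : Int) (hml : 0 ≤ ml) :
    find_common_blocks_py_alt l1 l2 ml
      = (PySem.List.pyRange 0 ((l1.length : Int) - ml + 1) 1).flatMap (pvGroup l1 l2 ml) := by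
  unfold find_common_blocks_py_alt
  apply List.flatMap_congr
  intro i hi
  have hmem := PySem.List.mem_pyRange_one.mp hi
  have hi0 : 0 ≤ i := hmem.1
  have hile : i.toNat ≤ l1.length := by omega
  unfold pvGroup
  have hfix : ∀ j ∈ PySem.List.pyRange 0 ((l2.length : Int) - ml + 1) 1,
      PySem.List.pyGetD (PySem.List.pyGetD (pvDpB l2 l1) i []) j 0
        = pvExt (l1.drop i.toNat) (l2.drop j.toNat) := by
    intro j hj
    exact pvLookup l1 l2 i j hi0 hile (PySem.List.mem_pyRange_one.mp hj).1
  rw [List.filter_congr (by intro j hj; rw [hfix j hj])]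
  apply List.map_congr_left
  intro j hj
  rw [hfix j (List.mem_of_mem_filter hj)]

-- ===== VERDICT (by name: the statement is the Claim_ definition above) =====
theorem find_common_blocks_py_spec : Claim_equal_find_common_blocks_py := by
  intro l1 l2 ml _ hpre
  show find_common_blocks_py l1 l2 ml = find_common_blocks_py_alt l1 l2 ml
  rw [A_eq, B_eq l1 l2 ml hpre]
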